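-- pv_equiv track=rewrite | github.com/verus-lang/paper-sosp24-artifact | milli/linked-list/repeat.FstarlowstarMain.fst.py | main_code
-- ===== SOURCE A (Python) =====
-- def main_code(n):
--     lsf = lambda j: "; ".join([f"{k}l" for k in range(j)])
--
--     p = lambda i: """
--   DLL.push #Int32.t #(G.hide [{l}]) l1 {i}l;
--   DLL.push #Int32.t #(G.hide [{l}]) l2 {i}l;
--   DLL.push #Int32.t #(G.hide [{l}]) l3 {i}l;
--   DLL.push #Int32.t #(G.hide [{l}]) l4 {i}l;
--     """.format(i=i, l=lsf(i))
--     return ("""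
-- module FstarlowstarMain
-- open LowStar.BufferOps
--
-- module DLL = Fstarlowstar
--
-- module B = LowStar.Buffer
-- module HS = FStar.HyperStack
-- module G = FStar.Ghost
-- module L = FStar.List.Tot
-- module U32 = FStar.UInt32
-- module MO = LowStar.Modifies
--
-- open FStar.HyperStack.ST
--
-- #push-options "--z3rlimit 600 --fuel 2 --ifuel 1"
--
-- val main2: unit -> ST (Prims.unit) (fun _ -> true) (fun _ _ _ -> true)
--
-- let main2 () =
--   let l1: B.pointer_or_null (DLL.t Int32.t) = B.malloc HS.root B.null 1ul in
--   let l2: B.pointer_or_null (DLL.t Int32.t) = B.malloc HS.root B.null 1ul in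
--   let l3: B.pointer_or_null (DLL.t Int32.t) = B.malloc HS.root B.null 1ul in
--   let l4: B.pointer_or_null (DLL.t Int32.t) = B.malloc HS.root B.null 1ul in""" +
--     "".join(p(i) for i in range(n)) + """
--   ()
-- """
--     )
-- ===== SOURCE B (Python) =====
-- HEADER = """
-- module FstarlowstarMain
-- open LowStar.BufferOps
--
-- module DLL = Fstarlowstar
--
-- module B = LowStar.Buffer
-- module HS = FStar.HyperStack
-- module G = FStar.Ghost
-- module L = FStar.List.Tot
-- module U32 = FStar.UInt32
-- module MO = LowStar.Modifies
--
-- open FStar.HyperStack.ST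
--
-- #push-options "--z3rlimit 600 --fuel 2 --ifuel 1"
--
-- val main2: unit -> ST (Prims.unit) (fun _ -> true) (fun _ _ _ -> true)
--
-- let main2 () =
--   let l1: B.pointer_or_null (DLL.t Int32.t) = B.malloc HS.root B.null 1ul in
--   let l2: B.pointer_or_null (DLL.t Int32.t) = B.malloc HS.root B.null 1ul in
--   let l3: B.pointer_or_null (DLL.t Int32.t) = B.malloc HS.root B.null 1ul in
--   let l4: B.pointer_or_null (DLL.t Int32.t) = B.malloc HS.root B.null 1ul in"""
--
-- FOOTER = """
--   ()
-- """
--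
-- BLOCK = """
--   DLL.push #Int32.t #(G.hide [{l}]) l1 {i}l;
--   DLL.push #Int32.t #(G.hide [{l}]) l2 {i}l;
--   DLL.push #Int32.t #(G.hide [{l}]) l3 {i}l;
--   DLL.push #Int32.t #(G.hide [{l}]) l4 {i}l;
--     """
--
-- def main_code(n):
--     # One accumulating pass: `prefix` is always "; ".join of the ids pushed so far,
--     # maintained incrementally instead of re-joined from scratch for every i.
--     out = HEADER
--     prefix = ""
--     for i in range(n):
--         out += BLOCK.format(i=i, l=prefix)
--         prefix = prefix + ("; " if prefix else "") + f"{i}l"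
--     return out + FOOTER
-- ===== Notes on version B (the rewrite author's own statement) =====
-- stated objective: alternative
-- what changed: B keeps the same header/footer and block template but replaces A's per-iteration "; ".join(range(i)) re-scan with a single running prefix string updated incrementally across one pass over range(n).
import Mathlib
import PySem

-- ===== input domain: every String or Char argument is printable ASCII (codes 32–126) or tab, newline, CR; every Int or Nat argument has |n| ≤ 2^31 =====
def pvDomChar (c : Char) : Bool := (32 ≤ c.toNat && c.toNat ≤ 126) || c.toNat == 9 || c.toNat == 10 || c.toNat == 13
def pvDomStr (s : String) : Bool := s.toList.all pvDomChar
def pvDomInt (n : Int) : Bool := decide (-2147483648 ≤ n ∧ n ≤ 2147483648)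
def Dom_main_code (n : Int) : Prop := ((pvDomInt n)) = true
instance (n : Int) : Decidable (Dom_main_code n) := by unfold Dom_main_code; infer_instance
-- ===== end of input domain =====

-- B replaces A's per-iteration "; ".join rescan by one accumulating prefix maintained across the loop (one accumulating pass instead of repeated re-joins).

-- shared literal text of the generated program (identical constants in A and B)
def pvHeader : String := "\nmodule FstarlowstarMain\nopen LowStar.BufferOps\n\nmodule DLL = Fstarlowstar\n\nmodule B = LowStar.Buffer\nmodule HS = FStar.HyperStack\nmodule G = FStar.Ghost\nmodule L = FStar.List.Tot\nmodule U32 = FStar.UInt32\nmodule MO = LowStar.Modifies\n\nopen FStar.HyperStack.ST\n\n#push-options \"--z3rlimit 600 --fuel 2 --ifuel 1\"\n\nval main2: unit -> ST (Prims.unit) (fun _ -> true) (fun _ _ _ -> true)\n\nlet main2 () =\n  let l1: B.pointer_or_null (DLL.t Int32.t) = B.malloc HS.root B.null 1ul in\n  let l2: B.pointer_or_null (DLL.t Int32.t) = B.malloc HS.root B.null 1ul in\n  let l3: B.pointer_or_null (DLL.t Int32.t) = B.malloc HS.root B.null 1ul in\n  let l4: B.pointer_or_null (DLL.t Int32.t)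 = B.malloc HS.root B.null 1ul in"

def pvFooter : String := "\n  ()\n"

def pvBlock (iS l : String) : String :=
  "\n  DLL.push #Int32.t #(G.hide [" ++ l ++ "]) l1 " ++ iS ++ "l;\n  DLL.push #Int32.t #(G.hide [" ++ l ++ "]) l2 " ++ iS ++ "l;\n  DLL.push #Int32.t #(G.hide [" ++ l ++ "]) l3 " ++ iS ++ "l;\n  DLL.push #Int32.t #(G.hide [" ++ l ++ "]) l4 " ++ iS ++ "l;\n    "

-- ===== PORT A =====
-- lsf = lambda j: "; ".join([f"{k}l" for k in range(j)])
def pvLsf (j : Int) : String :=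
  PySem.Str.join "; " ((PySem.List.pyRange 0 j 1).map (fun k => PySem.Int.toStr k ++ "l"))

-- p = lambda i: BLOCK.format(i=i, l=lsf(i))
def pvP (i : Int) : String := pvBlock (PySem.Int.toStr i) (pvLsf i)

-- HEADER + "".join(p(i) for i in range(n)) + FOOTER
def main_code (n : Int) : String :=
  pvHeader ++ PySem.Str.join "" ((PySem.List.pyRange 0 n 1).map pvP) ++ pvFooter

-- ===== PORT B =====
-- single pass: state = (out, prefix); out += BLOCK.format(i=i, l=prefix);
-- prefix = prefix + ("; " if prefix else "") + f"{i}l"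
def pvStepB (s : String × String) (i : Int) : String × String :=
  (s.1 ++ pvBlock (PySem.Int.toStr i) s.2,
   s.2 ++ (if s.2 = "" then "" else "; ") ++ (PySem.Int.toStr i ++ "l"))

def main_code_alt (n : Int) : String :=
  ((PySem.List.pyRange 0 n 1).foldl pvStepB (pvHeader, "")).1 ++ pvFooter

-- ===== PRECONDITION & SPEC =====
def Spec_main_code (n : Int) (out : String) : Prop := out = main_code_alt n
instance (n : Int) (out : String) : Decidable (Spec_main_code n out) := by unfold Spec_main_code; infer_instance

-- ===== CLAIM (what is proved, stated in full; the proofs are below) =====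
def Claim_equal_main_code : Prop := ∀ (n : Int), Dom_main_code n → Spec_main_code n (main_code n)

-- ===== LEMMAS AND PROOFS =====

theorem str_ext {s t : String} (h : s.toList = t.toList) : s = t := by
  exact String.ext (by simpa using h)

theorem str_join_nil (sep : String) : PySem.Str.join sep [] = "" := by
  apply str_ext; simp [PySem.Str.join, PySem.Chars.join, List.intercalate]

theorem str_join_singleton (sep x : String) : PySem.Str.join sep [x] = x := by
  apply str_ext; simp [PySem.Str.join, PySem.Chars.join, List.intercalate]

-- join over a snoc, nonempty front
theorem chars_join_snoc (sep x : List Char) (xs : List (List Char)) (h : xs ≠ []) :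
    PySem.Chars.join sep (xs ++ [x]) = PySem.Chars.join sep xs ++ sep ++ x := by
  induction xs with
  | nil => exact absurd rfl h
  | cons a rest ih =>
    cases rest with
    | nil => simp [PySem.Chars.join, List.intercalate]
    | cons b rest' =>
      calc PySem.Chars.join sep ((a :: b :: rest') ++ [x])
          = a ++ sep ++ PySem.Chars.join sep ((b :: rest') ++ [x]) :=
            PySem.Chars.join_cons_cons sep a b (rest' ++ [x])
        _ = a ++ sep ++ (PySem.Chars.join sep (b :: rest') ++ sep ++ x) := by
            rw [ih (by simp)]
        _ = PySem.Chars.join sep (a :: b :: rest') ++ sep ++ x := by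
            rw [PySem.Chars.join_cons_cons]; simp [List.append_assoc]

theorem str_join_snoc (sep x : String) (xs : List String) (h : xs ≠ []) :
    PySem.Str.join sep (xs ++ [x]) = PySem.Str.join sep xs ++ sep ++ x := by
  apply str_ext
  simp [PySem.Str.join,
    chars_join_snoc sep.toList x.toList (xs.map String.toList) (by simpa using h)]

theorem str_join_empty_snoc (x : String) (xs : List String) :
    PySem.Str.join "" (xs ++ [x]) = PySem.Str.join "" xs ++ x := by
  cases xs with
  | nil =>
    rw [List.nil_append, str_join_singleton, str_join_nil]
    exact str_ext (by simp)
  | cons a rest =>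
    rw [str_join_snoc _ _ _ (by simp)]
    exact str_ext (by simp)

-- Nat-indexed views of A's pieces
def pvFN (k : Nat) : String := PySem.Int.toStr (Int.ofNat k) ++ "l"
def pvLsfN (m : Nat) : String := PySem.Str.join "; " ((List.range m).map pvFN)
def pvBlocksN (m : Nat) : String :=
  PySem.Str.join "" ((List.range m).map (fun i => pvBlock (PySem.Int.toStr (Int.ofNat i)) (pvLsfN i)))

theorem range_cast (m : Nat) :
    PySem.List.pyRange 0 (m : Int) 1 = (List.range m).map Int.ofNat := by
  simpa [Int.ofNat_eq_natCast] using PySem.List.pyRange_zero_natCast m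

theorem lsf_natCast (m : Nat) : pvLsf (Int.ofNat m) = pvLsfN m := by
  unfold pvLsf pvLsfN pvFN
  rw [show ((Int.ofNat m) : Int) = ((m : Nat) : Int) from rfl, range_cast]
  rw [List.map_map]
  simp [Function.comp_def, Int.ofNat_eq_natCast]

theorem lsfN_ne_empty (m : Nat) (h : 0 < m) : pvLsfN m ≠ "" := by
  cases m with
  | zero => omega
  | succ k =>
    unfold pvLsfN
    rw [List.range_succ, List.map_append, List.map_cons, List.map_nil]
    cases k with
    | zero =>
      rw [List.range_zero, List.map_nil, List.nil_append, str_join_singleton]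
      intro hc
      have := congrArg String.toList hc
      simp [pvFN, PySem.Int.toStr] at this
    | succ k' =>
      rw [str_join_snoc _ _ _ (by simp)]
      intro hc
      have := congrArg String.toList hc
      simp at this

theorem lsfN_succ (m : Nat) : pvLsfN (m + 1) =
    pvLsfN m ++ (if pvLsfN m = "" then "" else "; ") ++ pvFN m := by
  unfold pvLsfN
  rw [List.range_succ, List.map_append, List.map_cons, List.map_nil]
  cases m with
  | zero =>
    apply str_ext
    simp [str_join_singleton, str_join_nil]
  | succ k =>
    rw [str_join_snoc _ _ _ (by simp)]
    rw [if_neg (by simpa [pvLsfN] using lsfN_ne_empty (k + 1) (by omega))]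

theorem blocksN_succ (m : Nat) :
    pvBlocksN (m + 1) = pvBlocksN m ++ pvBlock (PySem.Int.toStr (Int.ofNat m)) (pvLsfN m) := by
  unfold pvBlocksN
  rw [List.range_succ, List.map_append, List.map_cons, List.map_nil, str_join_empty_snoc]

theorem loop_invariant (m : Nat) :
    ((List.range m).map Int.ofNat).foldl pvStepB (pvHeader, "") =
      (pvHeader ++ pvBlocksN m, pvLsfN m) := by
  induction m with
  | zero =>
    rw [List.range_zero, List.map_nil, List.foldl_nil]
    have h1 : pvBlocksN 0 = "" := by
      unfold pvBlocksN; rw [List.range_zero, List.map_nil, str_join_nil]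
    have h2 : pvLsfN 0 = "" := by
      unfold pvLsfN; rw [List.range_zero, List.map_nil, str_join_nil]
    rw [h1, h2]
    exact Prod.ext (str_ext (by simp)) rfl
  | succ k ih =>
    rw [List.range_succ, List.map_append, List.map_cons, List.map_nil,
      List.foldl_append, ih]
    rw [List.foldl_cons, List.foldl_nil]
    unfold pvStepB
    refine Prod.ext ?_ ?_
    · show pvHeader ++ pvBlocksN k ++ pvBlock (PySem.Int.toStr (Int.ofNat k)) (pvLsfN k) =
        pvHeader ++ pvBlocksN (k + 1)
      rw [blocksN_succ, String.append_assoc]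
    · show pvLsfN k ++ (if pvLsfN k = "" then "" else "; ") ++ (PySem.Int.toStr (Int.ofNat k) ++ "l") =
        pvLsfN (k + 1)
      rw [lsfN_succ]; rfl

theorem blocks_eq_join (m : Nat) :
    PySem.Str.join "" (((List.range m).map Int.ofNat).map pvP) = pvBlocksN m := by
  unfold pvBlocksN
  congr 1
  rw [List.map_map]
  exact List.map_congr_left (fun k _ => by
    simp only [Function.comp, pvP, lsf_natCast])

theorem pyRange_neg (n : Int) (h : n < 0) : PySem.List.pyRange 0 n 1 = [] := by
  simp [PySem.List.pyRange]
  omega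

-- ===== VERDICT (by name: the statement is the Claim_ definition above) =====
set_option maxRecDepth 8192 in
theorem main_code_spec : Claim_equal_main_code := by
  intro n _
  unfold Spec_main_code main_code main_code_alt
  by_cases hn : 0 ≤ n
  · have hcast : n = ((n.toNat : Nat) : Int) := by omega
    rw [hcast, range_cast, loop_invariant, blocks_eq_join]
  · rw [pyRange_neg n (by omega)]
    rw [List.map_nil, List.foldl_nil, str_join_nil, String.append_empty]
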